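-- pv_equiv track=rewrite | github.com/owid/etl | etl/browser/filters.py | get_step_segment_positions
-- ===== SOURCE A (Python) =====
-- def get_step_segment_positions(item: str) -> dict[str, tuple[int, int]]:
--     """Get start/end positions for each segment of a step URI.
--
--     Args:
--         item: Step URI like "data://garden/who/2024-01-15/gho"
--
--     Returns:
--         Dict mapping segment names to (start, end) positions:
--         {"channel": (7, 13), "namespace": (14, 17), "version": (18, 28), "dataset": (29, 32)}
--     """
--     # Format: protocol://channel/namespace/version/dataset
--     if "://" not in item:
--         return {}
--
--     protocol_end = item.index("://") + 3
--     rest = item[protocol_end:]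
--     parts = rest.split("/")
--
--     if len(parts) < 4:
--         return {}
--
--     segments: dict[str, tuple[int, int]] = {}
--     pos = protocol_end
--
--     segment_names = ["channel", "namespace", "version", "dataset"]
--     for i, name in enumerate(segment_names):
--         if i < len(parts):
--             start = pos
--             end = pos + len(parts[i])
--             segments[name] = (start, end)
--             pos = end + 1  # +1 for the slash
--
--     return segments
-- ===== SOURCE B (Python) =====
-- def get_step_segment_positions(item: str) -> dict[str, tuple[int, int]]:
--     """Locate segment boundaries by scanning slash positions directly (no split)."""
--     sep = item.find("://")
--     if sep == -1:
--         return {}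
--     start = sep + 3
--     rest = item[start:]
--     slashes = [i for i, ch in enumerate(rest) if ch == "/"]
--     if len(slashes) < 3:
--         return {}
--     end4 = slashes[3] if len(slashes) >= 4 else len(rest)
--     return {
--         "channel": (start, start + slashes[0]),
--         "namespace": (start + slashes[0] + 1, start + slashes[1]),
--         "version": (start + slashes[1] + 1, start + slashes[2]),
--         "dataset": (start + slashes[2] + 1, start + end4),
--     }
-- ===== Notes on version B (the rewrite author's own statement) =====
-- stated objective: alternative
-- what changed: Instead of slicing off the protocol and splitting the remainder into a parts list whose lengths are re-accumulated in a dict-building loop, B scans the remainder once for the slash positions themselves and reads all four segment boundaries directly off the first three (and optional fourth) slash positions.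
import Mathlib
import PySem

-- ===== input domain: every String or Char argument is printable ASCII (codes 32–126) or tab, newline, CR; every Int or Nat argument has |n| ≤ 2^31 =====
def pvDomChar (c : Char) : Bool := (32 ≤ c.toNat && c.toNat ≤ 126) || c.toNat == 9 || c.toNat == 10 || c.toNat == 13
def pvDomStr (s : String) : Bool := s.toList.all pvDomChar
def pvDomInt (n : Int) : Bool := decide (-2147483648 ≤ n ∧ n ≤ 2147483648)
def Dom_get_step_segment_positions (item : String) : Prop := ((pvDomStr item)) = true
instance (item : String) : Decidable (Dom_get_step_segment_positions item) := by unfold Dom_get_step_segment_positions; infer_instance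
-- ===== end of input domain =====

-- B replaces split('/') by a direct scan of slash positions after the protocol (same return value; objective: alternative decomposition).

-- ===== PORT A =====
def get_step_segment_positions (item : String) : List (String × Int × Int) :=
  let s := item.toList
  if !(PySem.Chars.isIn "://".toList s) then []
  else
    -- item.index("://") never raises here: the guard ensures "://" occurs, so index = find
    let protocol_end : Int := PySem.Chars.find s "://".toList + 3
    let rest : List Char := PySem.List.slice s (some protocol_end) none
    let parts : List (List Char) := PySem.Chars.splitOn rest "/".toList
    if (parts.length : Int) < 4 then []
    else
      let segment_names := ["channel", "namespace", "version", "dataset"]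
      let fin := (PySem.List.enumerate segment_names 0).foldl
        (fun (st : PySem.Dict String (Int × Int) × Int) p =>
          if p.1 < (parts.length : Int) then
            let start := st.2
            let endp := st.2 + ((PySem.List.pyGetD parts p.1 []).length : Int)
            (st.1.insert p.2 (start, endp), endp + 1)
          else st)
        ((PySem.Dict.empty : PySem.Dict String (Int × Int)), protocol_end)
      fin.1.items

-- ===== PORT B =====
def get_step_segment_positions_alt (item : String) : List (String × Int × Int) :=
  let s := item.toList
  let sep := PySem.Chars.find s "://".toList
  if sep == -1 then []
  else
    let start := sep + 3
    let rest : List Char := PySem.List.slice s (some start) none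
    let slashes : List Int := ((PySem.List.enumerate rest 0).filter (fun p => p.2 == '/')).map (·.1)
    if (slashes.length : Int) < 3 then []
    else
      -- slashes[0], slashes[1], slashes[2] after the length ≥ 3 guard, as destructuring
      match slashes with
      | s1 :: s2 :: s3 :: tail =>
        let end4 : Int := match tail with
          | s4 :: _ => s4            -- slashes[3] when len(slashes) >= 4
          | [] => (rest.length : Int)
        [("channel", (start, start + s1)),
         ("namespace", (start + s1 + 1, start + s2)),
         ("version", (start + s2 + 1, start + s3)),
         ("dataset", (start + s3 + 1, start + end4))]
      | _ => []

-- ===== PRECONDITION & SPEC =====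
def Spec_get_step_segment_positions (item : String) (out : List (String × Int × Int)) : Prop := out = get_step_segment_positions_alt item
instance (item : String) (out : List (String × Int × Int)) : Decidable (Spec_get_step_segment_positions item out) := by unfold Spec_get_step_segment_positions; infer_instance

-- ===== CLAIM (what is proved, stated in full; the proofs are below) =====
def Claim_equal_get_step_segment_positions : Prop := ∀ (item : String), Dom_get_step_segment_positions item → Spec_get_step_segment_positions item (get_step_segment_positions item)

-- ===== LEMMAS AND PROOFS =====

-- simple structural split on a single separator character
def pvSplitc (c : Char) : List Char → List (List Char)
  | [] => [[]]
  | x :: xs => if x = c then [] :: pvSplitc c xs else (pvSplitc c xs).modifyHead (x :: ·)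

-- positions of c, as Python ints
def pvPosc (c : Char) : List Char → List Int
  | [] => []
  | x :: xs => if x = c then 0 :: (pvPosc c xs).map (· + 1) else (pvPosc c xs).map (· + 1)

-- cut positions read off the split parts
def pvCuts : List (List Char) → List Int
  | [] => []
  | [_] => []
  | p :: ps => (p.length : Int) :: (pvCuts ps).map (fun n => (p.length : Int) + 1 + n)

theorem pvSplitc_ne_nil (c : Char) (cs : List Char) : pvSplitc c cs ≠ [] := by
  cases cs with
  | nil => simp [pvSplitc]
  | cons x xs =>
    simp only [pvSplitc]
    split
    · simp
    · intro h
      have := pvSplitc_ne_nil c xs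
      cases hs : pvSplitc c xs with
      | nil => exact this hs
      | cons q qs => rw [hs] at h; simp [List.modifyHead] at h

theorem pv_go_inv (c : Char) (fuel : Nat) (l cur : List Char) (acc : List (List Char))
    (h : l.length ≤ fuel) :
    PySem.Chars.splitOn.go [c] fuel l cur acc
      = acc.reverse ++ (pvSplitc c l).modifyHead (cur.reverse ++ ·) := by
  induction fuel generalizing l cur acc with
  | zero =>
    have : l = [] := by cases l <;> simp_all
    subst this
    simp [PySem.Chars.splitOn.go, pvSplitc]
  | succ fuel ih =>
    cases l with
    | nil => simp [PySem.Chars.splitOn.go, pvSplitc]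
    | cons x xs =>
      by_cases hx : x = c
      · subst hx
        have hpre : [x].isPrefixOf (x :: xs) = true := by simp [List.isPrefixOf]
        rw [PySem.Chars.splitOn.go]
        simp only [hpre, if_true]
        rw [ih _ _ _ (by simpa using Nat.le_of_succ_le_succ h)]
        simp only [pvSplitc, if_true, List.modifyHead, List.reverse_cons, List.reverse_nil,
          List.nil_append, List.append_assoc, List.append_nil]
        cases hsx : pvSplitc x xs with
        | nil => exact absurd hsx (pvSplitc_ne_nil x xs)
        | cons a l => simp [hsx]
      · have hpre : [c].isPrefixOf (x :: xs) = false := by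
          simp [List.isPrefixOf]; exact fun h' => hx h'.symm
        rw [PySem.Chars.splitOn.go]
        simp only [hpre, Bool.false_eq_true, if_false]
        rw [ih _ _ _ (by simpa using Nat.le_of_succ_le_succ h)]
        obtain ⟨q, qs, hq⟩ := List.exists_cons_of_ne_nil (pvSplitc_ne_nil c xs)
        simp [pvSplitc, hx, hq, List.modifyHead]

theorem pv_splitOn_eq (c : Char) (cs : List Char) :
    PySem.Chars.splitOn cs [c] = pvSplitc c cs := by
  rw [PySem.Chars.splitOn, pv_go_inv c _ cs [] [] (by omega)]
  cases pvSplitc c cs <;> simp [List.modifyHead]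

theorem pv_slashes_eq (c : Char) (cs : List Char) (k : Int) :
    ((PySem.List.enumerate cs k).filter (fun p => p.2 == c)).map (·.1)
      = (pvPosc c cs).map (· + k) := by
  induction cs generalizing k with
  | nil => simp [pvPosc]
  | cons x xs ih =>
    rw [PySem.List.enumerate_cons]
    by_cases hx : x = c
    · subst hx
      simp only [pvPosc, if_true, List.filter_cons, beq_self_eq_true, List.map_cons, ih,
        List.map_map]
      refine List.cons_eq_cons.mpr ⟨by omega, ?_⟩
      exact List.map_congr_left fun a _ => by simp; omega
    · have hb : (x == c) = false := by simp [hx]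
      simp only [pvPosc, if_neg hx, List.filter_cons, hb, Bool.false_eq_true, if_false, ih]
      rw [List.map_map]
      exact List.map_congr_left fun a _ => by simp; omega

theorem pv_posc_eq_cuts (c : Char) (cs : List Char) :
    pvPosc c cs = pvCuts (pvSplitc c cs) := by
  induction cs with
  | nil => simp [pvPosc, pvSplitc, pvCuts]
  | cons x xs ih =>
    obtain ⟨q, qs, hq⟩ := List.exists_cons_of_ne_nil (pvSplitc_ne_nil c xs)
    by_cases hx : x = c
    · subst hx
      simp only [pvPosc, if_true, pvSplitc, ih, hq, pvCuts]
      refine List.cons_eq_cons.mpr ⟨by simp, ?_⟩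
      exact List.map_congr_left fun a _ => by simp; omega
    · simp only [pvPosc, if_neg hx, pvSplitc, ih, hq, List.modifyHead]
      cases qs with
      | nil => simp [pvCuts]
      | cons r rs =>
        simp only [pvCuts, List.map_cons, List.map_map, List.length_cons]
        refine List.cons_eq_cons.mpr ⟨by push_cast; omega, ?_⟩
        exact List.map_congr_left fun a _ => by simp; omega

theorem pv_cuts_length (l : List (List Char)) (h : l ≠ []) :
    (pvCuts l).length + 1 = l.length := by
  induction l with
  | nil => simp at h
  | cons p ps ih =>
    cases ps with
    | nil => simp [pvCuts]
    | cons q qs =>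
      have h2 := ih (by simp)
      simp only [pvCuts, List.length_cons, List.length_map] at h2 ⊢
      omega

theorem pv_len_eq (c : Char) (cs : List Char) :
    cs.length + 1 = ((pvSplitc c cs).map List.length).sum + (pvSplitc c cs).length := by
  induction cs with
  | nil => simp [pvSplitc]
  | cons x xs ih =>
    by_cases hx : x = c
    · subst hx
      simp only [pvSplitc, if_true, List.map_cons, List.sum_cons,
        List.length_cons, List.length_nil]
      omega
    · obtain ⟨q, qs, hq⟩ := List.exists_cons_of_ne_nil (pvSplitc_ne_nil c xs)
      rw [hq] at ih
      simp only [pvSplitc, if_neg hx, hq, List.modifyHead, List.map_cons, List.sum_cons,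
        List.length_cons] at *
      omega

-- ===== VERDICT (by name: the statement is the Claim_ definition above) =====
theorem get_step_segment_positions_spec : Claim_equal_get_step_segment_positions := by
  intro item _
  unfold Spec_get_step_segment_positions
  unfold get_step_segment_positions get_step_segment_positions_alt
  set s := item.toList with hs
  by_cases h : PySem.Chars.isIn "://".toList s = true
  · -- "://" occurs
    have hfind : PySem.Chars.find s "://".toList ≠ -1 := by
      rw [PySem.Chars.find_ne_neg_one_iff]
      exact (PySem.Chars.isIn_iff_infix _ _).mp h
    simp only [h, Bool.not_true, Bool.false_eq_true, if_false, beq_iff_eq, hfind, if_false]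
    set rest := PySem.List.slice s (some (PySem.Chars.find s "://".toList + 3)) none with hrest
    have hsplit : PySem.Chars.splitOn rest "/".toList = pvSplitc '/' rest := by
      have : ("/".toList : List Char) = ['/'] := rfl
      rw [this, pv_splitOn_eq]
    have hsl : ((PySem.List.enumerate rest 0).filter (fun p => p.2 == '/')).map (·.1)
        = pvCuts (pvSplitc '/' rest) := by
      rw [pv_slashes_eq, pv_posc_eq_cuts]
      simp
    have hlen := pv_cuts_length (pvSplitc '/' rest) (pvSplitc_ne_nil '/' rest)
    have hrl := pv_len_eq '/' rest
    by_cases hp : ((PySem.Chars.splitOn rest "/".toList).length : Int) < 4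
    · -- fewer than 4 parts ↔ fewer than 3 slashes
      rw [if_pos hp]
      rw [hsplit] at hp
      rw [if_pos ?_]
      rw [hsl]
      omega
    · rw [if_neg hp]
      rw [hsplit] at hp
      rw [if_neg ?_]
      swap
      · rw [hsl]; omega
      · -- at least 4 parts: name them
        obtain ⟨p0, t0, h0⟩ := List.exists_cons_of_ne_nil (pvSplitc_ne_nil '/' rest)
        rw [h0] at hp hlen hrl hsl
        obtain ⟨p1, t1, h1⟩ : ∃ q qs, t0 = q :: qs := by
          cases t0 with
          | nil => simp at hp
          | cons a b => exact ⟨a, b, rfl⟩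
        rw [h1] at hp hlen hrl hsl
        obtain ⟨p2, t2, h2⟩ : ∃ q qs, t1 = q :: qs := by
          cases t1 with
          | nil => simp at hp
          | cons a b => exact ⟨a, b, rfl⟩
        rw [h2] at hp hlen hrl hsl
        obtain ⟨p3, t3, h3⟩ : ∃ q qs, t2 = q :: qs := by
          cases t2 with
          | nil => simp at hp
          | cons a b => exact ⟨a, b, rfl⟩
        rw [h3] at hp hlen hrl hsl
        rw [hsplit, h0, h1, h2, h3, hsl]
        -- left side: unfold the 4-step fold
        simp only [PySem.List.enumerate_cons, PySem.List.enumerate_nil, List.foldl_cons,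
          List.foldl_nil]
        have hL : (((p0::p1::p2::p3::t3).length : Nat) : Int) = (t3.length : Int) + 4 := by
          push_cast [List.length_cons]; omega
        rw [if_pos (by rw [hL]; omega), if_pos (by rw [hL]; omega),
            if_pos (by rw [hL]; omega), if_pos (by rw [hL]; omega)]
        -- right side: evaluate pvCuts and the match
        cases t3 with
        | nil =>
          simp [pvCuts, PySem.List.pyGetD_ofNat',
            PySem.Dict.items_insert_of_not_contains, PySem.Dict.contains_insert,
            PySem.Dict.empty]
          and_intros <;> (push_cast [List.map_cons, List.map_nil, List.sum_cons, List.sum_nil, List.length_cons, List.length_nil] at hrl ⊢) <;> omega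
        | cons s4p t4 =>
          simp [pvCuts, PySem.List.pyGetD_ofNat',
            PySem.Dict.items_insert_of_not_contains, PySem.Dict.contains_insert,
            PySem.Dict.empty]
          and_intros <;> (push_cast [List.map_cons, List.map_nil, List.sum_cons, List.sum_nil, List.length_cons, List.length_nil] at hrl ⊢) <;> omega
  · -- no "://": both return []
    have h' : PySem.Chars.isIn "://".toList s = false := by
      cases hh : PySem.Chars.isIn "://".toList s
      · rfl
      · exact absurd hh h
    have hfind : PySem.Chars.find s "://".toList = -1 := by
      rw [PySem.Chars.find_eq_neg_one_iff]
      intro hinf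
      exact h ((PySem.Chars.isIn_iff_infix _ _).mpr hinf)
    simp only [h', hfind]
    norm_num
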